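-- pv_equiv track=rewrite | github.com/finnks13/functional-completeness-checker | checkfunc.py | check_self_dual
-- ===== SOURCE A (Python) =====
-- def check_self_dual(operator): # Condition 5
--     # Get the list of truth values and reverse it
--     vals = operator["truthVals"]
--     rVals = vals[::-1]
--
--     # Invert the truth values in the reversed list
--     for i, element in enumerate(rVals):
--          rVals[i] = not(bool(element))
--
--     # Check if the inverted reversed list is the same as the regular list
--     if (vals == rVals):
--         return True
--     else:
--         return False
-- ===== SOURCE B (Python) =====
-- def check_self_dual(operator): # Condition 5
--     # Two-pointer scan from both ends: vals[i] must equal not bool(vals[j])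
--     # for the mirror position j = n-1-i; short-circuits on first mismatch.
--     vals = operator["truthVals"]
--     n = len(vals)
--     i, j = 0, n - 1
--     while i < n:
--         if vals[i] != (not bool(vals[j])):
--             return False
--         i += 1
--         j -= 1
--     return True
-- ===== Notes on version B (the rewrite author's own statement) =====
-- stated objective: simpler
-- what changed: Replaced A's build of a reversed-and-inverted copy of the truth-value list followed by a bulk list comparison with a single two-pointer loop comparing vals[i] against not bool(vals[n-1-i]) from both ends, short-circuiting on the first mismatch; no intermediate list is built.
import Mathlib
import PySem

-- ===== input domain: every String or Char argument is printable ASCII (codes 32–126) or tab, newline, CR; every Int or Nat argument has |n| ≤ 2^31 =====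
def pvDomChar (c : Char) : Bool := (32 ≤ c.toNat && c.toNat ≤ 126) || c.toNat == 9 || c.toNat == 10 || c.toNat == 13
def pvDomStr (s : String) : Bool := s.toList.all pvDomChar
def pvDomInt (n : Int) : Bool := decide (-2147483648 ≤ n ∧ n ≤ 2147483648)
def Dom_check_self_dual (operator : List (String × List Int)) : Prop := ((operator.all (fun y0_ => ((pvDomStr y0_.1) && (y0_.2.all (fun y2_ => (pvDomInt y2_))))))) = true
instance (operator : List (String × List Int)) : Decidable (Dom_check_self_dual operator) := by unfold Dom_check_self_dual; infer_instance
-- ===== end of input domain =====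

-- B replaces A's build-reverse-invert-then-bulk-compare with a short-circuiting two-pointer scan (objective: simpler); return value only, no mutation observable through the argument.


-- ===== PORT A =====
-- vals == rVals compares a list of ints with a list of bools; Python's int == bool
-- coercion (True equals exactly 1, False exactly 0) is ported elementwise as
-- p.1 == (if p.2 then 1 else 0); lengths are compared first as Python's list == does.
-- The enumerate loop overwrites rVals[i] with not(bool(element)) elementwise: a map.
def check_self_dual (operator : List (String × List Int)) : Bool :=
  let vals := ((PySem.Dict.ofList operator).get? "truthVals").getD []
  let rVals := (PySem.List.slice? vals none none (-1)).getD []   -- vals[::-1]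
  let rVals := rVals.map (fun e => (e == 0))                     -- rVals[i] = not(bool(element))
  if decide (vals.length = rVals.length) &&
     (vals.zip rVals).all (fun p => p.1 == (if p.2 then (1:Int) else 0)) then
    true
  else
    false

-- ===== PORT B =====
-- while i < n: if vals[i] != (not bool(vals[j])): return False; i += 1; j -= 1
-- (not bool(vals[j])) is a Python bool; int != bool is ported as ≠ against (if · then 1 else 0);
-- pyGetD's default is never used: 0 ≤ i < n and j = n-1-i stays in range inside the loop.
def pvAltLoop (vals : List Int) (n : Nat) (i : Nat) (j : Int) : Bool :=
  if i < n then
    if PySem.List.pyGetD vals (i : Int) 0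
         != (if PySem.List.pyGetD vals j 0 = 0 then (1:Int) else 0) then
      false
    else
      pvAltLoop vals n (i + 1) (j - 1)
  else
    true
termination_by n - i

def check_self_dual_alt (operator : List (String × List Int)) : Bool :=
  let vals := ((PySem.Dict.ofList operator).get? "truthVals").getD []
  pvAltLoop vals vals.length 0 ((vals.length : Int) - 1)

-- ===== PRECONDITION & SPEC =====
-- Pre_ excludes exactly the inputs whose dict lacks a "truthVals" key, where Python A raises KeyError.
def Pre_check_self_dual (operator : List (String × List Int)) : Prop :=
  ((PySem.Dict.ofList operator).get? "truthVals").isSome = true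
instance (operator : List (String × List Int)) : Decidable (Pre_check_self_dual operator) := by unfold Pre_check_self_dual; infer_instance

def pvWitness_check_self_dual : (List (String × List Int)) := [("truthVals", [1, 0])]

def Spec_check_self_dual (operator : List (String × List Int)) (out : Bool) : Prop := out = check_self_dual_alt operator
instance (operator : List (String × List Int)) (out : Bool) : Decidable (Spec_check_self_dual operator out) := by unfold Spec_check_self_dual; infer_instance

-- ===== CLAIM (what is proved, stated in full; the proofs are below) =====
def Claim_equal_check_self_dual : Prop := ∀ (operator : List (String × List Int)), Dom_check_self_dual operator → Pre_check_self_dual operator → Spec_check_self_dual operator (check_self_dual operator)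

-- ===== LEMMAS AND PROOFS =====

-- the common content of both programs: position k agrees with the inverted mirror position
def pvOk (vals : List Int) (k : Nat) : Bool :=
  vals.getD k 0 == (if vals.getD (vals.length - 1 - k) 0 = 0 then (1:Int) else 0)

lemma pvOk_char (vals : List Int) (k : Nat) (hk : k < vals.length) :
    (pvOk vals k = true) ↔
      vals[k] = (if vals[vals.length - 1 - k]'(by omega) = 0 then (1:Int) else 0) := by
  unfold pvOk
  rw [List.getD_eq_getElem _ _ hk, List.getD_eq_getElem _ _ (by omega)]
  simp

-- B's loop checks pvOk on every index from i up to n-1, short-circuiting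
lemma pvAltLoop_eq (vals : List Int) (i : Nat) :
    pvAltLoop vals vals.length i ((vals.length : Int) - 1 - i)
      = decide (∀ k, k < vals.length → i ≤ k → pvOk vals k = true) := by
  have main : ∀ m i, vals.length - i ≤ m →
      pvAltLoop vals vals.length i ((vals.length : Int) - 1 - i)
        = decide (∀ k, k < vals.length → i ≤ k → pvOk vals k = true) := by
    intro m
    induction m with
    | zero =>
      intro i hi
      rw [pvAltLoop, if_neg (by omega)]
      symm
      simp only [decide_eq_true_eq]
      intro k hk hik; omega
    | succ m ih =>
      intro i hi
      by_cases h : i < vals.length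
      · rw [pvAltLoop, if_pos h]
        have hcast : ((vals.length : Int) - 1 - i) = ((vals.length - 1 - i : Nat) : Int) := by
          omega
        rw [hcast]
        simp only [PySem.List.pyGetD_natCast]
        by_cases hmis : vals[i]?.getD 0 = (if vals[vals.length - 1 - i]?.getD 0 = 0 then (1:Int) else 0)
        · rw [if_neg (by simp [hmis])]
          have hstep : ((vals.length : Int) - 1 - i) - 1 = ((vals.length : Int) - 1 - (i+1 : Nat)) := by
            push_cast; ring
          rw [hcast] at hstep
          rw [hstep, ih (i+1) (by omega)]
          rw [Bool.eq_iff_iff]; simp only [decide_eq_true_eq]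
          constructor
          · intro hrest k hk hik
            rcases Nat.eq_or_lt_of_le hik with rfl | hlt
            · simp [pvOk, List.getD_eq_getElem?_getD, hmis]
            · exact hrest k hk hlt
          · intro hall k hk hik; exact hall k hk (by omega)
        · rw [if_pos (by simpa using hmis)]
          symm
          simp only [decide_eq_false_iff_not]
          intro hall
          exact hmis (by simpa [pvOk, List.getD_eq_getElem?_getD] using hall i h le_rfl)
      · rw [pvAltLoop, if_neg h]
        symm; simp only [decide_eq_true_eq]
        intro k hk hik; omega
  exact main (vals.length - i) i le_rfl

-- A's build-then-compare also checks exactly pvOk at every index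
lemma portA_eq (vals : List Int) :
    ((if decide (vals.length = (vals.reverse.map (fun e => (e == 0))).length) &&
        (vals.zip (vals.reverse.map (fun e => (e == 0)))).all
          (fun p => p.1 == (if p.2 then (1:Int) else 0)) then true else false) : Bool)
      = decide (∀ k, k < vals.length → 0 ≤ k → pvOk vals k = true) := by
  simp only [List.length_map, List.length_reverse, Bool.true_and, decide_true, List.all_eq_true,
    Bool.if_true_left, Bool.or_false]
  rw [Bool.eq_iff_iff]
  simp only [decide_eq_true_eq]
  constructor
  · intro h k hk _
    have hkz : k < (vals.zip (vals.reverse.map (fun e => (e == 0)))).length := by simp [hk]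
    have := h _ (List.getElem_mem hkz)
    rw [List.getElem_zip, List.getElem_map, List.getElem_reverse] at this
    rw [pvOk_char vals k hk]
    simpa using this
  · intro h x hx
    obtain ⟨k, hkz, rfl⟩ := List.mem_iff_getElem.mp hx
    have hk : k < vals.length := by simpa using hkz
    have := (pvOk_char vals k hk).mp (h k hk (Nat.zero_le k))
    rw [List.getElem_zip, List.getElem_map, List.getElem_reverse]
    simpa using this

-- ===== VERDICT (by name: the statement is the Claim_ definition above) =====
theorem check_self_dual_spec : Claim_equal_check_self_dual := by
  intro operator _ _
  unfold Spec_check_self_dual check_self_dual check_self_dual_alt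
  simp only [PySem.List.slice?_none_none_neg_one, Option.getD_some]
  have hB := pvAltLoop_eq (((PySem.Dict.ofList operator).get? "truthVals").getD []) 0
  norm_num at hB
  rw [portA_eq, hB]
  norm_num
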